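-- pv_equiv track=rewrite | github.com/Dfam-consortium/RmAlign | telib/formats/caf.py | _caf_decode_to_aligned
-- ===== SOURCE A (Python) =====
-- def _caf_decode_to_aligned(encoded: str) -> tuple[str, str]:
--     """
--     Decode a CAF condensed string to aligned (query, target) strings.
--
--     Assumes CAF is encoded relative to the **query** row.
--
--     Returns
--     -------
--     (aligned_query_seq, aligned_target_seq)
--     """
--     query_row: list[str] = []
--     target_row: list[str] = []
--
--     i = 0
--     n = len(encoded)
--
--     while i < n:
--         c = encoded[i]
--
--         if c == '+':
--             # +TARGETSEG+ : insertion w.r.t query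
--             j = encoded.find('+', i + 1)
--             if j == -1:
--                 raise ValueError("CAF: unmatched '+' in insertion block")
--             target_seg = encoded[i + 1:j]
--             query_row.extend('-' * len(target_seg))
--             target_row.extend(target_seg)
--             i = j + 1
--             continue
--
--         if c == '-':
--             # -QUERYSEG- : deletion w.r.t query
--             j = encoded.find('-', i + 1)
--             if j == -1:
--                 raise ValueError("CAF: unmatched '-' in deletion block")
--             query_seg = encoded[i + 1:j]
--             query_row.extend(query_seg)
--             target_row.extend('-' * len(query_seg))
--             i = j + 1
--             continue
--
--         # Match (single char) or mismatch 'Q/T'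
--         if i + 2 < n and encoded[i + 1] == '/':
--             q_base = encoded[i]
--             t_base = encoded[i + 2]
--             query_row.append(q_base)
--             target_row.append(t_base)
--             i += 3
--         else:
--             b = encoded[i]
--             query_row.append(b)
--             target_row.append(b)
--             i += 1
--
--     return "".join(query_row), "".join(target_row)
-- ===== SOURCE B (Python) =====
-- import re
--
-- # One compiled token grammar: insertion block, deletion block, or a
-- # match/mismatch unit ('Q/T' needs a full trailing char, so a string ending
-- # in 'Q/' degrades to two single-char matches, as in the original).
-- _CAF_TOKEN = re.compile(r'\+[^+]*\+|-[^-]*-|[^+-](?:/.)?', re.DOTALL)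
--
--
-- def _caf_decode_to_aligned(encoded: str) -> tuple[str, str]:
--     query_parts: list[str] = []
--     target_parts: list[str] = []
--     pos = 0
--     n = len(encoded)
--     while pos < n:
--         m = _CAF_TOKEN.match(encoded, pos)
--         if m is None:
--             # only an unmatched '+' or '-' delimiter fails to tokenize
--             kind = "insertion" if encoded[pos] == '+' else "deletion"
--             raise ValueError(f"CAF: unmatched {encoded[pos]!r} in {kind} block")
--         tok = m.group()
--         head = tok[0]
--         if head == '+':
--             seg = tok[1:-1]
--             query_parts.append('-' * len(seg))
--             target_parts.append(seg)
--         elif head == '-':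
--             seg = tok[1:-1]
--             query_parts.append(seg)
--             target_parts.append('-' * len(seg))
--         elif len(tok) == 3:
--             query_parts.append(head)
--             target_parts.append(tok[2])
--         else:
--             query_parts.append(head)
--             target_parts.append(head)
--         pos = m.end()
--     return "".join(query_parts), "".join(target_parts)
-- ===== Notes on version B (the rewrite author's own statement) =====
-- stated objective: alternative
-- what changed: A's hand-rolled while loop over indices with str.find and slicing is replaced by a compiled-regex tokenizer: one token grammar (\+[^+]*\+|-[^-]*-|[^+-](?:/.)?, DOTALL) matched repeatedly, each token classified by its first character; joining whole segments instead of extending char lists.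
import Mathlib
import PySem

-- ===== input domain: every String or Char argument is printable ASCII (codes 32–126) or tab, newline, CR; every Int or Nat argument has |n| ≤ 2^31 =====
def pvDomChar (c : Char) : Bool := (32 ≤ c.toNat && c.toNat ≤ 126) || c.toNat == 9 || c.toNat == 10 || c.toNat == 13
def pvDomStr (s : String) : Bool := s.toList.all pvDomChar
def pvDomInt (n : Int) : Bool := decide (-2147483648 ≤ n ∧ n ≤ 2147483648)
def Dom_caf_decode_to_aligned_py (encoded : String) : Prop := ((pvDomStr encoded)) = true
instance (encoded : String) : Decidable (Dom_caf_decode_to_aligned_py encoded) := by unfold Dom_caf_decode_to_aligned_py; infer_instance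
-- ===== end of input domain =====

-- B re-implements the CAF decoder as a regex tokenizer (one compiled token grammar,
-- classify each token by its first character) instead of A's index-chasing while loop;
-- objective: alternative decomposition, same O(n) cost.

-- ===== PORT A =====
-- encoded.find(c, start) scans left-to-right for c; returns none where Python returns -1
def cafFind (d : Char) : List Char → Option Nat
  | [] => none
  | x :: xs => if x = d then some 0 else (cafFind d xs).map (· + 1)

-- the Python while-loop over index i; qr/tr are the accumulated char rows
def cafLoopA (s : List Char) (i : Nat) (qr tr : List Char) : List Char × List Char :=
  if h : i < s.length then
    if s[i] = '+' then
      match cafFind '+' (s.drop (i + 1)) with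
      | none => (qr, tr)          -- Python raises ValueError here (excluded by Pre_)
      | some k =>
          let seg := (s.drop (i + 1)).take k
          cafLoopA s (i + 1 + k + 1) (qr ++ List.replicate seg.length '-') (tr ++ seg)
    else if s[i] = '-' then
      match cafFind '-' (s.drop (i + 1)) with
      | none => (qr, tr)          -- Python raises ValueError here (excluded by Pre_)
      | some k =>
          let seg := (s.drop (i + 1)).take k
          cafLoopA s (i + 1 + k + 1) (qr ++ seg) (tr ++ List.replicate seg.length '-')
    else if i + 2 < s.length ∧ s[i+1]! = '/' then
      cafLoopA s (i + 3) (qr ++ [s[i]]) (tr ++ [s[i+2]!])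
    else
      cafLoopA s (i + 1) (qr ++ [s[i]]) (tr ++ [s[i]])
  else (qr, tr)
termination_by s.length - i
decreasing_by all_goals omega

def caf_decode_to_aligned_py (encoded : String) : String × String :=
  let r := cafLoopA encoded.toList 0 [] []
  (String.ofList r.1, String.ofList r.2)

-- ===== PORT B =====
-- hand-port of the regex alternative `d[^d]*d` matched at the start of s (exact for
-- this pattern): token spans to the first later d, returning (inner segment, rest)
def pvMatchBlock (d : Char) (s : List Char) : Option (List Char × List Char) :=
  match s with
  | [] => none
  | c :: rest =>
    if c = d then
      if rest.contains d then
        some (rest.takeWhile (· ≠ d), (rest.dropWhile (· ≠ d)).tail)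
      else none
    else none

-- termination helper for cafLoopB (cited by its decreasing_by)
theorem pvMatchBlock_rest_length {d : Char} {s seg s' : List Char}
    (h : pvMatchBlock d s = some (seg, s')) : s'.length < s.length := by
  cases s with
  | nil => simp [pvMatchBlock] at h
  | cons c rest =>
    simp only [pvMatchBlock] at h
    split_ifs at h with h1 h2
    · injection h with h
      obtain ⟨rfl, rfl⟩ := Prod.mk.inj h
      have h3 := List.length_dropWhile_le (fun x => decide (x ≠ d)) rest
      simp only [List.length_tail, List.length_cons]
      omega

-- the tokenizing loop: match one regex token at the front, classify by its head,
-- append whole segments (joined by flatten at the end, as "".join does);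
-- the third regex alternative `[^+-](?:/.)?` is the 4 cons-shape cases below
def cafLoopB : List Char → List (List Char) → List (List Char) → List (List Char) × List (List Char)
  | [], qp, tp => (qp, tp)
  | c :: rest, qp, tp =>
    match h1 : pvMatchBlock '+' (c :: rest) with
    | some (seg, s') => cafLoopB s' (qp ++ [List.replicate seg.length '-']) (tp ++ [seg])
    | none =>
      match h2 : pvMatchBlock '-' (c :: rest) with
      | some (seg, s') => cafLoopB s' (qp ++ [seg]) (tp ++ [List.replicate seg.length '-'])
      | none =>
        if c = '+' ∨ c = '-' then (qp, tp)   -- no token matches: Python raises ValueError (excluded by Pre_)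
        else if rest.head? = some '/' ∧ rest.tail ≠ [] then
          -- three-char token c '/' t : t is rest[1]
          cafLoopB (rest.drop 2) (qp ++ [[c]]) (tp ++ [[rest[1]!]])
        else
          cafLoopB rest (qp ++ [[c]]) (tp ++ [[c]])
termination_by s _ _ => s.length
decreasing_by
  · exact pvMatchBlock_rest_length h1
  · exact pvMatchBlock_rest_length h2
  · simp only [List.length_drop, List.length_cons]; omega
  · simp

def caf_decode_to_aligned_py_alt (encoded : String) : String × String :=
  let r := cafLoopB encoded.toList [] []
  (String.ofList r.1.flatten, String.ofList r.2.flatten)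

-- ===== PRECONDITION & SPEC =====
-- Pre_ excludes exactly the inputs on which A raises ValueError (an insertion/deletion
-- block opened by '+'/'-' with no closing delimiter); B raises ValueError there too.
-- Stated as membership in the regular token language ( '+seg+' | '-seg-' | char['/'char] )*,
-- decided by one scan of a 5-state automaton: S = at a token start, P/M = inside an open
-- '+'/'-' block, C1 = just after a plain char, C2 = just after "char '/'".
inductive CafState
  | S | P | M | C1 | C2
deriving DecidableEq, Repr

def cafStep : CafState → Char → CafState
  | .S, c => if c = '+' then .P else if c = '-' then .M else .C1
  | .P, c => if c = '+' then .S else .P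
  | .M, c => if c = '-' then .S else .M
  | .C1, c => if c = '/' then .C2 else if c = '+' then .P else if c = '-' then .M else .C1
  | .C2, _ => .S

-- valid iff the scan does not end inside an open block
def Pre_caf_decode_to_aligned_py (encoded : String) : Prop :=
  encoded.toList.foldl cafStep CafState.S ≠ CafState.P ∧
  encoded.toList.foldl cafStep CafState.S ≠ CafState.M
instance (encoded : String) : Decidable (Pre_caf_decode_to_aligned_py encoded) := by unfold Pre_caf_decode_to_aligned_py; infer_instance

def pvWitness_caf_decode_to_aligned_py : String := "AC/GT+AA+-CC-"

def Spec_caf_decode_to_aligned_py (encoded : String) (out : String × String) : Prop := out = caf_decode_to_aligned_py_alt encoded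
instance (encoded : String) (out : String × String) : Decidable (Spec_caf_decode_to_aligned_py encoded out) := by unfold Spec_caf_decode_to_aligned_py; infer_instance

-- ===== CLAIM (what is proved, stated in full; the proofs are below) =====
def Claim_equal_caf_decode_to_aligned_py : Prop := ∀ (encoded : String), Dom_caf_decode_to_aligned_py encoded → Pre_caf_decode_to_aligned_py encoded → Spec_caf_decode_to_aligned_py encoded (caf_decode_to_aligned_py encoded)

-- ===== LEMMAS AND PROOFS =====

-- proof-side recognizer: the token grammar read off recursively (bridged to the DFA below)
def validCAF : List Char → Bool
  | [] => true
  | c :: rest =>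
    if c = '+' ∨ c = '-' then
      rest.contains c && validCAF ((rest.dropWhile (· ≠ c)).tail)
    else if rest.head? = some '/' ∧ rest.tail ≠ [] then validCAF (rest.drop 2)
    else validCAF rest
termination_by s => s.length
decreasing_by
  · have h3 := List.length_dropWhile_le (fun x => decide (x ≠ c)) rest
    simp only [List.length_tail, List.length_cons]
    omega
  · simp only [List.length_drop, List.length_cons]; omega
  · simp



-- step equations for cafLoopA (one Python loop iteration each)
theorem cafLoopA_stop {s : List Char} {i : Nat} (h : ¬ i < s.length) (qr tr : List Char) :
    cafLoopA s i qr tr = (qr, tr) := by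
  rw [cafLoopA]; simp [h]

theorem cafLoopA_plus {s : List Char} {i k : Nat} (hi : i < s.length) (hc : s[i] = '+')
    (hk : cafFind '+' (s.drop (i + 1)) = some k) (qr tr : List Char) :
    cafLoopA s i qr tr = cafLoopA s (i + 1 + k + 1)
      (qr ++ List.replicate ((s.drop (i + 1)).take k).length '-') (tr ++ (s.drop (i + 1)).take k) := by
  rw [cafLoopA, dif_pos hi, if_pos hc, hk]

theorem cafLoopA_minus {s : List Char} {i k : Nat} (hi : i < s.length) (hc : s[i] = '-')
    (hk : cafFind '-' (s.drop (i + 1)) = some k) (qr tr : List Char) :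
    cafLoopA s i qr tr = cafLoopA s (i + 1 + k + 1)
      (qr ++ (s.drop (i + 1)).take k) (tr ++ List.replicate ((s.drop (i + 1)).take k).length '-') := by
  rw [cafLoopA, dif_pos hi, if_neg (by rw [hc]; decide), if_pos hc, hk]

theorem cafLoopA_pair {s : List Char} {i : Nat} (hi : i < s.length)
    (hc1 : ¬ s[i] = '+') (hc2 : ¬ s[i] = '-') (hp : i + 2 < s.length ∧ s[i+1]! = '/')
    (qr tr : List Char) :
    cafLoopA s i qr tr = cafLoopA s (i + 3) (qr ++ [s[i]]) (tr ++ [s[i+2]!]) := by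
  rw [cafLoopA, dif_pos hi, if_neg hc1, if_neg hc2, if_pos hp]

theorem cafLoopA_single {s : List Char} {i : Nat} (hi : i < s.length)
    (hc1 : ¬ s[i] = '+') (hc2 : ¬ s[i] = '-') (hp : ¬ (i + 2 < s.length ∧ s[i+1]! = '/'))
    (qr tr : List Char) :
    cafLoopA s i qr tr = cafLoopA s (i + 1) (qr ++ [s[i]]) (tr ++ [s[i]]) := by
  rw [cafLoopA, dif_pos hi, if_neg hc1, if_neg hc2, if_neg hp]

-- step equations for cafLoopB (one regex token each)
theorem cafLoopB_nil (qp tp : List (List Char)) : cafLoopB [] qp tp = (qp, tp) := by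
  rw [cafLoopB]

theorem cafLoopB_plus {rest : List Char} (hcont : rest.contains '+' = true)
    (qp tp : List (List Char)) :
    cafLoopB ('+' :: rest) qp tp =
      cafLoopB ((rest.dropWhile (· ≠ '+')).tail)
        (qp ++ [List.replicate (rest.takeWhile (· ≠ '+')).length '-'])
        (tp ++ [rest.takeWhile (· ≠ '+')]) := by
  have hmem : '+' ∈ rest := by simpa using hcont
  have hm : pvMatchBlock '+' ('+' :: rest) =
      some (rest.takeWhile (· ≠ '+'), (rest.dropWhile (· ≠ '+')).tail) := by
    simp [pvMatchBlock, hmem]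
  rw [cafLoopB]
  split
  · rename_i seg s' h1
    rw [hm] at h1
    injection h1 with h1
    obtain ⟨rfl, rfl⟩ := Prod.mk.inj h1
    rfl
  · rename_i h1
    rw [hm] at h1
    cases h1

theorem cafLoopB_minus {rest : List Char} (hcont : rest.contains '-' = true)
    (qp tp : List (List Char)) :
    cafLoopB ('-' :: rest) qp tp =
      cafLoopB ((rest.dropWhile (· ≠ '-')).tail)
        (qp ++ [rest.takeWhile (· ≠ '-')])
        (tp ++ [List.replicate (rest.takeWhile (· ≠ '-')).length '-']) := by
  have hmem : '-' ∈ rest := by simpa using hcont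
  have hm : pvMatchBlock '-' ('-' :: rest) =
      some (rest.takeWhile (· ≠ '-'), (rest.dropWhile (· ≠ '-')).tail) := by
    simp [pvMatchBlock, hmem]
  have hm' : pvMatchBlock '+' ('-' :: rest) = none := by simp [pvMatchBlock]
  rw [cafLoopB]
  split
  · rename_i seg s' h1
    rw [hm'] at h1; cases h1
  · split
    · rename_i seg s' h2
      rw [hm] at h2
      injection h2 with h2
      obtain ⟨rfl, rfl⟩ := Prod.mk.inj h2
      rfl
    · rename_i h2
      rw [hm] at h2
      cases h2

theorem cafLoopB_one {c : Char} (hc1 : ¬ c = '+') (hc2 : ¬ c = '-') (qp tp : List (List Char)) :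
    cafLoopB [c] qp tp = cafLoopB [] (qp ++ [[c]]) (tp ++ [[c]]) := by
  have hm1 : pvMatchBlock '+' [c] = none := by simp [pvMatchBlock, hc1]
  have hm2 : pvMatchBlock '-' [c] = none := by simp [pvMatchBlock, hc2]
  conv_lhs => rw [cafLoopB]
  split
  · rename_i seg s2 h1; rw [hm1] at h1; cases h1
  · split
    · rename_i seg s2 h2; rw [hm2] at h2; cases h2
    · rw [if_neg (fun h => h.elim hc1 hc2), if_neg (by simp)]

theorem cafLoopB_two {c x : Char} (hc1 : ¬ c = '+') (hc2 : ¬ c = '-') (qp tp : List (List Char)) :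
    cafLoopB [c, x] qp tp = cafLoopB [x] (qp ++ [[c]]) (tp ++ [[c]]) := by
  have hm1 : pvMatchBlock '+' [c, x] = none := by simp [pvMatchBlock, hc1]
  have hm2 : pvMatchBlock '-' [c, x] = none := by simp [pvMatchBlock, hc2]
  rw [cafLoopB]
  split
  · rename_i seg s2 h1; rw [hm1] at h1; cases h1
  · split
    · rename_i seg s2 h2; rw [hm2] at h2; cases h2
    · rw [if_neg (fun h => h.elim hc1 hc2), if_neg (by simp)]

theorem cafLoopB_pairTok {c t : Char} {s' : List Char} (hc1 : ¬ c = '+') (hc2 : ¬ c = '-')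
    (qp tp : List (List Char)) :
    cafLoopB (c :: '/' :: t :: s') qp tp = cafLoopB s' (qp ++ [[c]]) (tp ++ [[t]]) := by
  have hm1 : pvMatchBlock '+' (c :: '/' :: t :: s') = none := by simp [pvMatchBlock, hc1]
  have hm2 : pvMatchBlock '-' (c :: '/' :: t :: s') = none := by simp [pvMatchBlock, hc2]
  rw [cafLoopB]
  split
  · rename_i seg s2 h1; rw [hm1] at h1; cases h1
  · split
    · rename_i seg s2 h2; rw [hm2] at h2; cases h2
    · rw [if_neg (fun h => h.elim hc1 hc2), if_pos (by simp)]
      simp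

theorem cafLoopB_noslash {c x y : Char} {s' : List Char} (hc1 : ¬ c = '+') (hc2 : ¬ c = '-')
    (hx : ¬ x = '/') (qp tp : List (List Char)) :
    cafLoopB (c :: x :: y :: s') qp tp = cafLoopB (x :: y :: s') (qp ++ [[c]]) (tp ++ [[c]]) := by
  have hm1 : pvMatchBlock '+' (c :: x :: y :: s') = none := by simp [pvMatchBlock, hc1]
  have hm2 : pvMatchBlock '-' (c :: x :: y :: s') = none := by simp [pvMatchBlock, hc2]
  rw [cafLoopB]
  split
  · rename_i seg s2 h1; rw [hm1] at h1; cases h1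
  · split
    · rename_i seg s2 h2; rw [hm2] at h2; cases h2
    · rw [if_neg (fun h => h.elim hc1 hc2), if_neg (by simp [hx])]

-- step equations for the grammar recognizer validCAF
theorem validCAF_nil : validCAF [] = true := by rw [validCAF]

theorem validCAF_plus {rest : List Char} :
    validCAF ('+' :: rest) =
      (rest.contains '+' && validCAF ((rest.dropWhile (· ≠ '+')).tail)) := by
  rw [validCAF, if_pos (Or.inl rfl)]

theorem validCAF_minus {rest : List Char} :
    validCAF ('-' :: rest) =
      (rest.contains '-' && validCAF ((rest.dropWhile (· ≠ '-')).tail)) := by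
  rw [validCAF, if_pos (Or.inr rfl)]

theorem validCAF_two {c x : Char} (hc1 : ¬ c = '+') (hc2 : ¬ c = '-') :
    validCAF [c, x] = validCAF [x] := by
  rw [validCAF, if_neg (fun h => h.elim hc1 hc2), if_neg (by simp)]

theorem validCAF_pairTok {c t : Char} {rest : List Char} (hc1 : ¬ c = '+') (hc2 : ¬ c = '-') :
    validCAF (c :: '/' :: t :: rest) = validCAF rest := by
  rw [validCAF, if_neg (fun h => h.elim hc1 hc2), if_pos (by simp)]
  rfl

theorem validCAF_noslash {c x y : Char} {rest : List Char} (hc1 : ¬ c = '+') (hc2 : ¬ c = '-')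
    (hx : ¬ x = '/') :
    validCAF (c :: x :: y :: rest) = validCAF (x :: y :: rest) := by
  rw [validCAF, if_neg (fun h => h.elim hc1 hc2), if_neg (by simp [hx])]

-- characterization of A's find against B's takeWhile/dropWhile split
theorem cafFind_none_iff (d : Char) (l : List Char) :
    cafFind d l = none ↔ l.contains d = false := by
  induction l with
  | nil => simp [cafFind]
  | cons x xs ih =>
    by_cases hx : x = d
    · simp [cafFind, hx]
    · simp [cafFind, hx, ih, Option.map_eq_none_iff]
      exact fun _ h => hx h.symm

theorem cafFind_take_drop {d : Char} {l : List Char} {k : Nat}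
    (h : cafFind d l = some k) :
    l.take k = l.takeWhile (· ≠ d) ∧ l.drop (k + 1) = (l.dropWhile (· ≠ d)).tail := by
  induction l generalizing k with
  | nil => simp [cafFind] at h
  | cons x xs ih =>
    by_cases hx : x = d
    · simp [cafFind, hx] at h
      subst hx; subst h
      simp [List.takeWhile, List.dropWhile]
    · simp only [cafFind, if_neg hx, Option.map_eq_some_iff] at h
      obtain ⟨k', hk', rfl⟩ := h
      have := ih hk'
      simp [List.takeWhile, List.dropWhile, hx, this.1, this.2]

-- DFA facts: running from inside a block, and C1 behaving like S off '/'
theorem foldl_cafStep_P (rest : List Char) :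
    rest.foldl cafStep CafState.P =
      (if rest.contains '+' then ((rest.dropWhile (· ≠ '+')).tail).foldl cafStep CafState.S
       else CafState.P) := by
  induction rest with
  | nil => simp
  | cons x xs ih =>
    by_cases hx : x = '+'
    · subst hx
      simp [List.foldl_cons, cafStep]
    · simp [List.foldl_cons, cafStep, hx, ih, Ne.symm hx]

theorem foldl_cafStep_M (rest : List Char) :
    rest.foldl cafStep CafState.M =
      (if rest.contains '-' then ((rest.dropWhile (· ≠ '-')).tail).foldl cafStep CafState.S
       else CafState.M) := by
  induction rest with
  | nil => simp
  | cons x xs ih =>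
    by_cases hx : x = '-'
    · subst hx
      simp [List.foldl_cons, cafStep]
    · simp [List.foldl_cons, cafStep, hx, ih, Ne.symm hx]

theorem foldl_cafStep_C1 {x : Char} (xs : List Char) (hx : ¬ x = '/') :
    (x :: xs).foldl cafStep CafState.C1 = (x :: xs).foldl cafStep CafState.S := by
  have : cafStep CafState.C1 x = cafStep CafState.S x := by
    simp [cafStep, hx]
  simp [List.foldl_cons, this]

-- the recognizer and the DFA agree
theorem validCAF_iff_dfa : ∀ (m : Nat) (s : List Char), s.length ≤ m →
    (validCAF s = true ↔
      (s.foldl cafStep CafState.S ≠ CafState.P ∧ s.foldl cafStep CafState.S ≠ CafState.M)) := by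
  intro m
  induction m with
  | zero =>
    intro s hm
    have : s = [] := List.eq_nil_of_length_eq_zero (by omega)
    subst this
    simp [validCAF_nil, List.foldl_nil]
  | succ m ih =>
    intro s hm
    cases s with
    | nil => simp [validCAF_nil, List.foldl_nil]
    | cons c rest =>
      simp only [List.length_cons] at hm
      by_cases hp : c = '+'
      · subst hp
        have hstep : (('+' : Char) :: rest).foldl cafStep CafState.S =
            rest.foldl cafStep CafState.P := by
          simp [List.foldl_cons, cafStep]
        rw [validCAF_plus, hstep, foldl_cafStep_P]
        by_cases hcont : rest.contains '+' = true
        · have htl : ((rest.dropWhile (· ≠ '+')).tail).length ≤ m := by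
            have h1 := List.length_dropWhile_le (fun x => decide (x ≠ '+')) rest
            simp only [List.length_tail] at *
            omega
          rw [if_pos hcont]
          simp only [hcont, Bool.true_and]
          exact ih _ htl
        · rw [if_neg hcont]
          simp at hcont
          simp [hcont]
      · by_cases hm2 : c = '-'
        · subst hm2
          have hstep : (('-' : Char) :: rest).foldl cafStep CafState.S =
              rest.foldl cafStep CafState.M := by
            simp [List.foldl_cons, cafStep]
          rw [validCAF_minus, hstep, foldl_cafStep_M]
          by_cases hcont : rest.contains '-' = true
          · have htl : ((rest.dropWhile (· ≠ '-')).tail).length ≤ m := by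
              have h1 := List.length_dropWhile_le (fun x => decide (x ≠ '-')) rest
              simp only [List.length_tail] at *
              omega
            rw [if_pos hcont]
            simp only [hcont, Bool.true_and]
            exact ih _ htl
          · rw [if_neg hcont]
            simp at hcont
            simp [hcont]
        · have hstep : (c :: rest).foldl cafStep CafState.S =
              rest.foldl cafStep CafState.C1 := by
            simp [List.foldl_cons, cafStep, hp, hm2]
          rw [hstep]
          rcases rest with - | ⟨x, rest2⟩
          · rw [show validCAF [c] = validCAF [] from by
              conv_lhs => rw [validCAF, if_neg (fun h => h.elim hp hm2), if_neg (by simp)]]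
            simp [validCAF_nil, List.foldl_nil]
          · by_cases hx : x = '/'
            · subst hx
              rcases rest2 with - | ⟨t, rest3⟩
              · rw [show validCAF [c, '/'] = validCAF ['/'] from validCAF_two hp hm2]
                rw [show validCAF ['/'] = validCAF [] from by
                  conv_lhs => rw [validCAF, if_neg (by decide), if_neg (by simp)]]
                simp [validCAF_nil, List.foldl_cons, List.foldl_nil, cafStep]
              · rw [validCAF_pairTok hp hm2]
                have hstep2 : (('/' : Char) :: t :: rest3).foldl cafStep CafState.C1 =
                    rest3.foldl cafStep CafState.S := by
                  simp [List.foldl_cons, cafStep]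
                rw [hstep2]
                simp only [List.length_cons] at hm
                exact ih rest3 (by omega)
            · rw [show validCAF (c :: x :: rest2) = validCAF (x :: rest2) from by
                rw [validCAF, if_neg (fun h => h.elim hp hm2), if_neg (by simp [hx])]]
              rw [foldl_cafStep_C1 rest2 hx]
              exact ih (x :: rest2) (by simpa using hm)

theorem loop_eq (s : List Char) : ∀ (m i : Nat) (qp tp : List (List Char)),
    s.length - i ≤ m → validCAF (s.drop i) = true →
    cafLoopA s i qp.flatten tp.flatten =
      ((cafLoopB (s.drop i) qp tp).1.flatten, (cafLoopB (s.drop i) qp tp).2.flatten) := by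
  intro m
  induction m with
  | zero =>
    intro i qp tp hm _
    have hge : s.length ≤ i := by omega
    rw [List.drop_eq_nil_of_le hge, cafLoopA_stop (by omega), cafLoopB_nil]
  | succ m ih =>
    intro i qp tp hm hv
    by_cases hi : i < s.length
    case neg =>
      have hge : s.length ≤ i := by omega
      rw [List.drop_eq_nil_of_le hge, cafLoopA_stop hi, cafLoopB_nil]
    case pos =>
    have hdrop : s.drop i = s[i] :: s.drop (i + 1) := List.drop_eq_getElem_cons hi
    by_cases hp : s[i] = '+'
    · -- insertion block
      rw [hdrop, hp, validCAF_plus, Bool.and_eq_true] at hv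
      obtain ⟨hcont, hrec⟩ := hv
      obtain ⟨k, hk⟩ : ∃ k, cafFind '+' (s.drop (i + 1)) = some k := by
        cases hfind : cafFind '+' (s.drop (i + 1)) with
        | none => rw [cafFind_none_iff, hcont] at hfind; cases hfind
        | some k => exact ⟨k, rfl⟩
      obtain ⟨htake, hdrop2⟩ := cafFind_take_drop hk
      have hdrop3 : s.drop (i + 1 + k + 1) = ((s.drop (i + 1)).dropWhile (· ≠ '+')).tail := by
        rw [← hdrop2, List.drop_drop]
        congr 1
        try omega
      rw [cafLoopA_plus hi hp hk, hdrop, hp, cafLoopB_plus hcont, htake]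
      have := ih (i + 1 + k + 1)
        (qp ++ [List.replicate ((s.drop (i + 1)).takeWhile (· ≠ '+')).length '-'])
        (tp ++ [(s.drop (i + 1)).takeWhile (· ≠ '+')])
        (by omega) (by rw [hdrop3]; exact hrec)
      rw [hdrop3] at this
      simpa using this
    · by_cases hm2 : s[i] = '-'
      · -- deletion block
        rw [hdrop, hm2, validCAF_minus, Bool.and_eq_true] at hv
        obtain ⟨hcont, hrec⟩ := hv
        obtain ⟨k, hk⟩ : ∃ k, cafFind '-' (s.drop (i + 1)) = some k := by
          cases hfind : cafFind '-' (s.drop (i + 1)) with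
          | none => rw [cafFind_none_iff, hcont] at hfind; cases hfind
          | some k => exact ⟨k, rfl⟩
        obtain ⟨htake, hdrop2⟩ := cafFind_take_drop hk
        have hdrop3 : s.drop (i + 1 + k + 1) = ((s.drop (i + 1)).dropWhile (· ≠ '-')).tail := by
          rw [← hdrop2, List.drop_drop]
          congr 1
          try omega
        rw [cafLoopA_minus hi hm2 hk, hdrop, hm2, cafLoopB_minus hcont, htake]
        have := ih (i + 1 + k + 1)
          (qp ++ [(s.drop (i + 1)).takeWhile (· ≠ '-')])
          (tp ++ [List.replicate ((s.drop (i + 1)).takeWhile (· ≠ '-')).length '-'])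
          (by omega) (by rw [hdrop3]; exact hrec)
        rw [hdrop3] at this
        simpa using this
      · -- match / mismatch token: case on the shape of the remainder
        rw [hdrop] at hv
        rcases hr : s.drop (i + 1) with - | ⟨x, rest2⟩
        · -- nothing after: single char, loop ends next step
          have hlen := congrArg List.length hr
          simp only [List.length_drop, List.length_nil] at hlen
          have hpair : ¬ (i + 2 < s.length ∧ s[i+1]! = '/') := fun h => by omega
          rw [cafLoopA_single hi hp hm2 hpair, hdrop, hr, cafLoopB_one hp hm2]
          have := ih (i + 1) (qp ++ [[s[i]]]) (tp ++ [[s[i]]]) (by omega)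
            (by rw [hr]; exact validCAF_nil)
          rw [hr] at this
          simpa using this
        · rcases rest2 with - | ⟨y, rest3⟩
          · -- exactly one char after: 'Q/' at the end degrades to single chars
            have hlen := congrArg List.length hr
            simp only [List.length_drop, List.length_cons, List.length_nil] at hlen
            have hpair : ¬ (i + 2 < s.length ∧ s[i+1]! = '/') := fun h => by omega
            rw [hr, validCAF_two hp hm2] at hv
            rw [cafLoopA_single hi hp hm2 hpair, hdrop, hr, cafLoopB_two hp hm2]
            have := ih (i + 1) (qp ++ [[s[i]]]) (tp ++ [[s[i]]]) (by omega)
              (by rw [hr]; exact hv)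
            rw [hr] at this
            simpa using this
          · have hlen := congrArg List.length hr
            simp only [List.length_drop, List.length_cons] at hlen
            have h1 : i + 1 < s.length := by omega
            have h2 : i + 2 < s.length := by omega
            have hc1 : s[i+1] :: s.drop (i + 2) = x :: y :: rest3 := by
              rw [← List.drop_eq_getElem_cons h1, hr]
            obtain ⟨hx1, htl1⟩ := List.cons.inj hc1
            have hc2 : s[i+2] :: s.drop (i + 3) = y :: rest3 := by
              rw [← List.drop_eq_getElem_cons h2, htl1]
            obtain ⟨hy2, htl2⟩ := List.cons.inj hc2
            by_cases hx : x = '/'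
            · -- mismatch token 'Q/T'
              have hpair : i + 2 < s.length ∧ s[i+1]! = '/' := by
                refine ⟨h2, ?_⟩
                rw [getElem!_pos s (i+1) h1, hx1, hx]
              rw [hr, hx, validCAF_pairTok hp hm2] at hv
              rw [cafLoopA_pair hi hp hm2 hpair, hdrop, hr, hx, cafLoopB_pairTok hp hm2]
              have := ih (i + 3) (qp ++ [[s[i]]]) (tp ++ [[y]]) (by omega)
                (by rw [htl2]; exact hv)
              rw [htl2] at this
              have hbang : s[i+2]! = y := by rw [getElem!_pos s (i+2) h2, hy2]
              rw [hbang]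
              simpa using this
            · -- next char is not '/': single char token
              have hpair : ¬ (i + 2 < s.length ∧ s[i+1]! = '/') := by
                rintro ⟨-, hsl⟩
                rw [getElem!_pos s (i+1) h1, hx1] at hsl
                exact hx hsl
              rw [hr, validCAF_noslash hp hm2 hx] at hv
              rw [cafLoopA_single hi hp hm2 hpair, hdrop, hr, cafLoopB_noslash hp hm2 hx]
              have := ih (i + 1) (qp ++ [[s[i]]]) (tp ++ [[s[i]]]) (by omega)
                (by rw [hr]; exact hv)
              rw [hr] at this
              simpa using this

-- ===== VERDICT (by name: the statement is the Claim_ definition above) =====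
theorem caf_decode_to_aligned_py_spec : Claim_equal_caf_decode_to_aligned_py := by
  intro encoded _ hpre
  unfold Spec_caf_decode_to_aligned_py caf_decode_to_aligned_py caf_decode_to_aligned_py_alt
  have hvalid : validCAF encoded.toList = true :=
    (validCAF_iff_dfa encoded.toList.length encoded.toList le_rfl).mpr hpre
  have := loop_eq encoded.toList encoded.toList.length 0 [] [] (by omega) hvalid
  simp only [List.drop_zero, List.flatten_nil] at this
  simp [this]
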